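-- pv_equiv track=rewrite | github.com/fearlesspandas/tda | Betti.py | islessthan
-- ===== SOURCE A (Python) =====
-- def islessthan(a,b):
--     if type(a) == int:
--         if a<b:
--             return True
--         else:
--             return False
--     for i in range(0,len(a)):
--         if len(a) == 1 and len(b) == 1:
--             a = a[0]
--             b = b[0]
--             return islessthan(a,b)
--         elif a[i] < b[i]:
--             return True
--         elif a[i] > b[i]:
--             return False
--     return False
-- ===== SOURCE B (Python) =====
-- def islessthan(a, b):
--     # Backward accumulator fold: walk the zipped pairs from LAST to FIRST with
--     # no early exit; each strict difference overwrites the answer, so the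
--     # leftmost difference (processed last) wins. Correct because later pairs
--     # only matter when all earlier pairs are equal, i.e. when they never
--     # overwrite. Default False covers the all-equal/empty prefix.
--     result = False
--     for x, y in reversed(list(zip(a, b))):
--         if x < y:
--             result = True
--         elif x > y:
--             result = False
--     return result
-- ===== Notes on version B (the rewrite author's own statement) =====
-- stated objective: alternative
-- what changed: Replaces A's early-return forward scan with singleton recursion by a full backward fold over reversed(zip(a,b)) carrying an accumulator that each strict difference overwrites (last write = leftmost difference wins), with no early exit and no recursion.
-- outside the precondition, e.g. on islessthan([1, 1, 5], [1, 1]): A raises IndexError, B returns False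
import Mathlib
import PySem

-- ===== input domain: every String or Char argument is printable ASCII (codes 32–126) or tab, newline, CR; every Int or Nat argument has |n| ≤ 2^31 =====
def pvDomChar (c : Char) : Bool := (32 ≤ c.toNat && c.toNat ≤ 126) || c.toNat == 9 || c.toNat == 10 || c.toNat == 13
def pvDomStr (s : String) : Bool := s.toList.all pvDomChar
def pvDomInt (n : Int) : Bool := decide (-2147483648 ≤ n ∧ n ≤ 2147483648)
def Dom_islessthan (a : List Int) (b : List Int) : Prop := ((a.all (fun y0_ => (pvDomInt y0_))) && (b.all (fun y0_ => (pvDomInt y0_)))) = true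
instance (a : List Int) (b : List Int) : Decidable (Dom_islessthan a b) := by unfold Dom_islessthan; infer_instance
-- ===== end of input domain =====

-- B replaces A's early-return forward scan (with singleton recursion) by a full backward
-- accumulator fold over reversed(zip(a,b)); equivalence of return values on Pre_
-- (the inputs where A does not raise IndexError).


-- ===== PORT A =====
-- the 'for i in range(0, len(a))' loop; in the both-singleton branch Python
-- recurses on the two ints a[0], b[0] and the int base case returns a[0] < b[0],
-- which is transliterated as that direct comparison
def islessthanGo (a : List Int) (b : List Int) (i : Nat) : Bool :=
  if i < a.length then
    if a.length = 1 ∧ b.length = 1 then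
      match PySem.List.pyGet? a 0, PySem.List.pyGet? b 0 with
      | some x, some y => decide (x < y)
      | _, _ => false    -- unreachable: both lists have length 1
    else
      match PySem.List.pyGet? a (i : Int), PySem.List.pyGet? b (i : Int) with
      | some x, some y =>
          if x < y then true
          else if y < x then false
          else islessthanGo a b (i + 1)
      | _, _ => false    -- IndexError (b[i] out of range); excluded by Pre_
  else false
termination_by a.length - i

def islessthan (a : List Int) (b : List Int) : Bool := islessthanGo a b 0

-- ===== PORT B =====
-- reversed(list(zip(a,b))) then the accumulator loop = foldl over the reversed zip
def islessthan_alt (a : List Int) (b : List Int) : Bool :=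
  ((a.zip b).reverse).foldl
    (fun result p => if p.1 < p.2 then true else if p.2 < p.1 then false else result)
    false

-- ===== PRECONDITION & SPEC =====
-- Pre_ excludes exactly the inputs where A raises IndexError: a longer than b,
-- not the both-singleton case, and a agreeing with b on all of b's indices.
def Pre_islessthan (a : List Int) (b : List Int) : Prop :=
  (a.length = 1 ∧ b.length = 1) ∨ a.length ≤ b.length ∨
    ∃ j, j < b.length ∧ a.getD j 0 ≠ b.getD j 0
instance (a : List Int) (b : List Int) : Decidable (Pre_islessthan a b) := by
  unfold Pre_islessthan; infer_instance

def pvWitness_islessthan : List Int × List Int := ([1, 2], [1, 3])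

def Spec_islessthan (a : List Int) (b : List Int) (out : Bool) : Prop := out = islessthan_alt a b
instance (a : List Int) (b : List Int) (out : Bool) : Decidable (Spec_islessthan a b out) := by unfold Spec_islessthan; infer_instance

-- ===== CLAIM (what is proved, stated in full; the proofs are below) =====
def Claim_equal_islessthan : Prop := ∀ (a : List Int) (b : List Int), Dom_islessthan a b → Pre_islessthan a b → Spec_islessthan a b (islessthan a b)

-- ===== LEMMAS AND PROOFS =====

-- B's foldl over the reversed list is the foldr over the zip
lemma alt_eq_foldr (a b : List Int) :
    islessthan_alt a b =
      (a.zip b).foldr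
        (fun p result => if p.1 < p.2 then true else if p.2 < p.1 then false else result)
        false := by
  simp [islessthan_alt, List.foldl_reverse]

lemma go_eq (n : Nat) : ∀ (a b : List Int) (i : Nat), a.length - i ≤ n →
    ¬(a.length = 1 ∧ b.length = 1) →
    (a.length ≤ b.length ∨ ∃ j, i ≤ j ∧ j < b.length ∧ a.getD j 0 ≠ b.getD j 0) →
    islessthanGo a b i =
      ((a.drop i).zip (b.drop i)).foldr
        (fun p result => if p.1 < p.2 then true else if p.2 < p.1 then false else result)
        false := by
  induction n with
  | zero =>
      intro a b i hle h11 _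
      have hia : a.length ≤ i := by omega
      rw [islessthanGo]
      simp [Nat.not_lt.mpr hia, List.drop_eq_nil_of_le hia]
  | succ n ih =>
      intro a b i hle h11 hinv
      by_cases hia : i < a.length
      · have hib : i < b.length := by
          rcases hinv with h | ⟨j, hij, hjb, _⟩
          · omega
          · omega
        rw [islessthanGo]
        simp only [hia, if_true, h11, if_false]
        have ha : PySem.List.pyGet? a (i : Int) = some a[i] :=
          PySem.List.pyGet?_ofNat (h := hia)
        have hb : PySem.List.pyGet? b (i : Int) = some b[i] :=
          PySem.List.pyGet?_ofNat (h := hib)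
        rw [ha, hb]
        have hda : a.drop i = a[i] :: a.drop (i + 1) := List.drop_eq_getElem_cons hia
        have hdb : b.drop i = b[i] :: b.drop (i + 1) := List.drop_eq_getElem_cons hib
        rw [hda, hdb]
        simp only [List.zip_cons_cons, List.foldr_cons]
        by_cases hxy : a[i] = b[i]
        · simp only [hxy, lt_self_iff_false, if_false]
          apply ih a b (i + 1) (by omega) h11
          rcases hinv with h | ⟨j, hij, hjb, hne⟩
          · exact Or.inl h
          · refine Or.inr ⟨j, ?_, hjb, hne⟩
            rcases Nat.lt_or_ge i j with h' | h'
            · omega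
            · exfalso
              have : j = i := by omega
              subst this
              apply hne
              rw [List.getD_eq_getElem _ _ hia, List.getD_eq_getElem _ _ hib, hxy]
        · by_cases hlt : a[i] < b[i]
          · simp [hlt]
          · have hgt : b[i] < a[i] := by
              rcases lt_trichotomy a[i] b[i] with h | h | h
              · exact absurd h hlt
              · exact absurd h hxy
              · exact h
            simp [hlt, hgt]
      · rw [islessthanGo]
        have hia' : a.length ≤ i := by omega
        simp [hia, List.drop_eq_nil_of_le hia']

lemma singleton_case (a b : List Int) (ha : a.length = 1) (hb : b.length = 1) :
    islessthan a b = islessthan_alt a b := by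
  match a, b with
  | [x], [y] =>
      rw [islessthan, islessthanGo, alt_eq_foldr]
      simp only [List.length_cons, List.length_nil]
      rw [if_pos (by omega), if_pos (by simp)]
      simp only [PySem.List.pyGet?_zero_cons]
      simp only [List.zip_cons_cons, List.zip_nil_right, List.foldr_cons, List.foldr_nil]
      by_cases hxy : x < y
      · simp [hxy]
      · by_cases hyx : y < x
        · simp [hxy, hyx]
        · simp [hxy, hyx]

-- ===== VERDICT (by name: the statement is the Claim_ definition above) =====
theorem islessthan_spec : Claim_equal_islessthan := by
  intro a b _ hpre
  unfold Spec_islessthan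
  by_cases h11 : a.length = 1 ∧ b.length = 1
  · exact singleton_case a b h11.1 h11.2
  · have hinv : a.length ≤ b.length ∨
        ∃ j, 0 ≤ j ∧ j < b.length ∧ a.getD j 0 ≠ b.getD j 0 := by
      rcases hpre with h | h | ⟨j, hjb, hne⟩
      · exact absurd h h11
      · exact Or.inl h
      · exact Or.inr ⟨j, Nat.zero_le j, hjb, hne⟩
    have := go_eq a.length a b 0 (by omega) h11 hinv
    rw [islessthan, alt_eq_foldr]
    simpa using this
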